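-- pv_equiv track=rewrite | github.com/mn113/codewars-solutions | python/4x4skyscrapers.py | look_line
-- ===== SOURCE A (Python) =====
-- def look_line(arr):
--     i = 0
--     hi = arr[0]
--     count = 0
--     while i < len(arr):
--         if arr[i] >= hi:
--             count += 1
--             hi = arr[i]
--         i += 1
--     return count
-- ===== SOURCE B (Python) =====
-- def look_line(arr):
--     # two-pass: build the prefix-maxima table, then count positions where
--     # the element equals its running maximum (same as being a new max).
--     maxes = [arr[0]]
--     for a in arr[1:]:
--         maxes.append(max(maxes[-1], a))
--     return sum(a == m for a, m in zip(arr, maxes))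
-- ===== Notes on version B (the rewrite author's own statement) =====
-- stated objective: alternative
-- what changed: Replaced A's single index-driven running-max-and-count while loop by a two-pass table decomposition: first build the prefix-maxima list, then count positions where the element equals its prefix maximum.
import Mathlib
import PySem

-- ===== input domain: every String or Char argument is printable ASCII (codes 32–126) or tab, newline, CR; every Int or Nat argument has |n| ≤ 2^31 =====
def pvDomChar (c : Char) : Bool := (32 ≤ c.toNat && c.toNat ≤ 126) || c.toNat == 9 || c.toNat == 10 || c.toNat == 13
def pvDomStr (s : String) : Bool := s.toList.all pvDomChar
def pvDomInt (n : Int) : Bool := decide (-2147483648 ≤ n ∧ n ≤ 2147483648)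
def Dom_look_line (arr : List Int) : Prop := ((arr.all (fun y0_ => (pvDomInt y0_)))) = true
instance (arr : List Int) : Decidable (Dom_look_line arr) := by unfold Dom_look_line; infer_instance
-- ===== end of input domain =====

-- B builds a prefix-maxima table and then counts elements equal to their prefix maximum,
-- instead of A's single running-max while loop; equivalence is for non-empty input (both raise on []).

-- ===== PORT A =====
-- the while loop of A: scans the elements in order, carrying hi and count
def lookLoopA (l : List Int) (hi count : Int) : Int :=
  match l with
  | [] => count
  | a :: rest => if hi ≤ a then lookLoopA rest a (count + 1) else lookLoopA rest hi count

def look_line (arr : List Int) : Int :=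
  match arr with
  | [] => 0  -- hi = arr[0] raises IndexError in Python; excluded by Pre_look_line
  | h :: _ => lookLoopA arr h 0

-- ===== PORT B =====
-- the for loop of B: appends max(maxes[-1], a) for each remaining element (m carries maxes[-1])
def buildMaxes (t : List Int) (m : Int) : List Int :=
  match t with
  | [] => []
  | a :: rest => max m a :: buildMaxes rest (max m a)

def look_line_alt (arr : List Int) : Int :=
  match arr with
  | [] => 0  -- maxes = [arr[0]] raises IndexError in Python; excluded by Pre_look_line
  | h :: t =>
    let maxes := h :: buildMaxes t h
    (((arr.zip maxes).countP (fun p => p.1 == p.2) : Nat) : Int)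

-- ===== PRECONDITION & SPEC =====
-- Pre_ excludes exactly the empty list, on which both Pythons raise IndexError (arr[0]).
def Pre_look_line (arr : List Int) : Prop := arr ≠ []
instance (arr : List Int) : Decidable (Pre_look_line arr) := by unfold Pre_look_line; infer_instance
def pvWitness_look_line : List Int := ([3, 1, 4, 4, 2])

def Spec_look_line (arr : List Int) (out : Int) : Prop := out = look_line_alt arr
instance (arr : List Int) (out : Int) : Decidable (Spec_look_line arr out) := by unfold Spec_look_line; infer_instance

-- ===== CLAIM (what is proved, stated in full; the proofs are below) =====
def Claim_equal_look_line : Prop := ∀ (arr : List Int), Dom_look_line arr → Pre_look_line arr → Spec_look_line arr (look_line arr)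

-- ===== LEMMAS AND PROOFS =====

-- A's loop adds to `count` exactly the number of positions where the element equals
-- the running maximum (seeded with hi), which is what B counts via its table.
theorem lookLoopA_eq_count (l : List Int) : ∀ (hi c : Int),
    lookLoopA l hi c = c + (((l.zip (buildMaxes l hi)).countP (fun p => p.1 == p.2) : Nat) : Int) := by
  induction l with
  | nil => intro hi c; simp [lookLoopA, buildMaxes]
  | cons a rest ih =>
    intro hi c
    by_cases h : hi ≤ a
    · have h1 : lookLoopA (a :: rest) hi c = lookLoopA rest a (c + 1) := by
        rw [lookLoopA, if_pos h]
      have h2 : buildMaxes (a :: rest) hi = a :: buildMaxes rest a := by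
        rw [buildMaxes, max_eq_right h]
      rw [h1, ih, h2, List.zip_cons_cons, List.countP_cons]
      simp only [BEq.rfl, if_true]
      push_cast
      omega
    · have h1 : lookLoopA (a :: rest) hi c = lookLoopA rest hi c := by
        rw [lookLoopA, if_neg h]
      have h2 : buildMaxes (a :: rest) hi = hi :: buildMaxes rest hi := by
        rw [buildMaxes, max_eq_left (not_le.mp h).le]
      have hne : (a == hi) = false := by
        rw [beq_eq_false_iff_ne]; exact fun heq => h heq.ge
      rw [h1, ih, h2, List.zip_cons_cons, List.countP_cons]
      simp only [hne, Bool.false_eq_true, if_false]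
      push_cast
      omega

-- ===== VERDICT (by name: the statement is the Claim_ definition above) =====
theorem look_line_spec : Claim_equal_look_line := by
  intro arr _ hpre
  unfold Spec_look_line
  match arr with
  | [] => exact absurd rfl hpre
  | h :: t =>
    show lookLoopA (h :: t) h 0 = _
    rw [lookLoopA_eq_count]
    simp [look_line_alt, buildMaxes, max_self]
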